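-- pv_equiv track=rewrite | github.com/Rag-x/Tareas | Deber2/while.py | suman
-- ===== SOURCE A (Python) =====
-- def suman(numero):
--     sumap = 0
--     i = 0
--     while i <= numero:
--         if i % 2 == 0:
--             sumap += i
--         i += 1
--     return sumap
-- ===== SOURCE B (Python) =====
-- def suman(numero):
--     if numero < 0:
--         return 0
--     m = numero // 2
--     return m * (m + 1)
-- ===== Notes on version B (the rewrite author's own statement) =====
-- stated objective: faster
-- what changed: Replaced the linear while-loop that accumulates every even number up to numero with a closed-form product of half the bound and its successor (zero for negative input).
import Mathlib
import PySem

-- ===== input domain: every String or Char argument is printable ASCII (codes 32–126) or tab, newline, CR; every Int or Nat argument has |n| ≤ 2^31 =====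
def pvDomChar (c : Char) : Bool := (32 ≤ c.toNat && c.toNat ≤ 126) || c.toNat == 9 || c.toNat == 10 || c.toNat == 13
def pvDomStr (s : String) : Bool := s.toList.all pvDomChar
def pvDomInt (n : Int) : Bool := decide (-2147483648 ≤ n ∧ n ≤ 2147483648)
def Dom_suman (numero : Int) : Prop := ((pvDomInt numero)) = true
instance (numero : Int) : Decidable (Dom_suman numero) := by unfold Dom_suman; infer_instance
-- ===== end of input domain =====

-- B replaces A's O(n) accumulation loop by the closed form m*(m+1), m = numero//2 (faster, asymptotic).

-- ===== PORT A =====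
def sumanLoop (numero i sumap : Int) : Int :=
  if i ≤ numero then
    sumanLoop numero (i + 1) (if PySem.Int.mod i 2 = 0 then sumap + i else sumap)
  else sumap
termination_by (numero + 1 - i).toNat
decreasing_by omega

def suman (numero : Int) : Int := sumanLoop numero 0 0

-- ===== PORT B =====
def suman_alt (numero : Int) : Int :=
  if numero < 0 then 0
  else
    let m := PySem.Int.floordiv numero 2
    m * (m + 1)

-- ===== PRECONDITION & SPEC =====
def Spec_suman (numero : Int) (out : Int) : Prop := out = suman_alt numero
instance (numero : Int) (out : Int) : Decidable (Spec_suman numero out) := by unfold Spec_suman; infer_instance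

-- ===== CLAIM (what is proved, stated in full; the proofs are below) =====
def Claim_equal_suman : Prop := ∀ (numero : Int), Dom_suman numero → Spec_suman numero (suman numero)

-- ===== LEMMAS AND PROOFS =====

theorem sumanLoop_closed (numero : Int) (fuel : Nat) :
    ∀ (i sumap : Int), (numero + 1 - i).toNat = fuel → 0 ≤ i → i ≤ numero + 1 →
      sumanLoop numero i sumap
        = sumap + (numero / 2) * (numero / 2 + 1) - ((i + 1) / 2 - 1) * ((i + 1) / 2) := by
  induction fuel with
  | zero =>
    intro i s hf h0 hle
    have hi : i = numero + 1 := by omega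
    subst hi
    rw [sumanLoop, if_neg (by omega)]
    have hk : (numero + 1 + 1) / 2 = numero / 2 + 1 := by omega
    rw [hk]; ring
  | succ fuel ih =>
    intro i s hf h0 hle
    have hi : i ≤ numero := by omega
    rw [sumanLoop, if_pos hi, ih (i + 1) _ (by omega) (by omega) (by omega)]
    rw [PySem.Int.mod_eq_emod_of_pos (by norm_num)]
    split_ifs with h
    · obtain ⟨t, ht⟩ : ∃ t, i = 2 * t := ⟨i / 2, by omega⟩
      have h1 : (i + 1 + 1) / 2 = t + 1 := by omega
      have h2 : (i + 1) / 2 = t := by omega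
      rw [h1, h2, ht]; ring
    · obtain ⟨t, ht⟩ : ∃ t, i = 2 * t + 1 := ⟨i / 2, by omega⟩
      have h1 : (i + 1 + 1) / 2 = t + 1 := by omega
      have h2 : (i + 1) / 2 = t + 1 := by omega
      rw [h1, h2]

-- ===== VERDICT (by name: the statement is the Claim_ definition above) =====
theorem suman_spec : Claim_equal_suman := by
  intro numero _
  unfold Spec_suman suman suman_alt
  by_cases hneg : numero < 0
  · rw [sumanLoop, if_neg (by omega), if_pos hneg]
  · rw [sumanLoop_closed numero (numero + 1 - 0).toNat 0 0 rfl le_rfl (by omega),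
      if_neg hneg, PySem.Int.floordiv_eq_ediv_of_pos (by norm_num)]
    have h1 : ((0 : Int) + 1) / 2 = 0 := by decide
    rw [h1]; ring
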